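-- pv_equiv track=rewrite | github.com/INHOBBO/Programmers-Python | 프로그래머스/1/142086. 가장 가까운 같은 글자/가장 가까운 같은 글자.py | solution
-- ===== SOURCE A (Python) =====
-- def solution(s):
--     answer = []
--
--     for i in range(len(s)):
--         if s[i] not in s[0:i]:
--             answer.append(-1)
--         else:
--             # 현재 인덱스 - 나온 단어 인덱스
--             #"내 앞부분(s[:i])에서, 지금 내 글자(s[i])가 어디 있는지 뒤에서부터 거꾸로 찾아줘!"
--             last_index = s[0:i].rfind(s[i])
--             answer.append(i-last_index)
--
--     return answer
-- ===== SOURCE B (Python) =====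
-- def solution(s):
--     answer = [-1] * len(s)
--     for c in sorted(set(s)):
--         idxs = [i for i, ch in enumerate(s) if ch == c]
--         for prev, cur in zip(idxs, idxs[1:]):
--             answer[cur] = cur - prev
--     return answer
-- ===== Notes on version B (the rewrite author's own statement) =====
-- stated objective: faster
-- what changed: Instead of rescanning the prefix for every index (membership test plus rfind), B groups indices by character: it preallocates the answer as [-1]*n and, for each distinct character, collects its occurrence list once and scatters the gaps between consecutive occurrences into the answer.
import Mathlib
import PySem

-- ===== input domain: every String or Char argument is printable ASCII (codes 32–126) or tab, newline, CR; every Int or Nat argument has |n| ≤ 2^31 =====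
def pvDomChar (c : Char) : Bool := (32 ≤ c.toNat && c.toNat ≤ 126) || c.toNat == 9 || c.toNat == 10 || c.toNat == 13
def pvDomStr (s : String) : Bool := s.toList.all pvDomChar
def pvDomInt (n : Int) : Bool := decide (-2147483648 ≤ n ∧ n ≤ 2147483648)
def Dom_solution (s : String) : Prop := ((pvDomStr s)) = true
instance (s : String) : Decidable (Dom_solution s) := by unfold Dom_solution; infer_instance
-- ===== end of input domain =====

-- B replaces A's per-index prefix scan (membership + rfind) by grouping: the answer
-- is preallocated as [-1]*n and, per distinct character, the gaps between consecutive
-- occurrences are scattered into it.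

-- ===== PORT A =====
-- hand port of Python str.rfind restricted to a single character: scan left to
-- right keeping the index of the last match, -1 if none (exact on all inputs)
def pyRfind (l : List Char) (c : Char) : Int :=
  (PySem.List.enumerate l 0).foldl (fun acc p => if p.2 = c then p.1 else acc) (-1)

def solution (s : String) : List Int :=
  (List.range s.toList.length).foldl (fun answer i =>
    if s.toList.getD i ' ' ∉ s.toList.take i then
      answer ++ [(-1 : Int)]
    else
      answer ++ [(i : Int) - pyRfind (s.toList.take i) (s.toList.getD i ' ')]) []

-- ===== PORT B =====
-- 'for c in sorted(set(s))'  → fold over PySem.List.sorted (PySem.Set.ofList …);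
-- '[i for i, ch in enumerate(s) if ch == c]' → filter+map over PySem.List.enumerate;
-- 'idxs[1:]' = tail for a list (exact); 'answer[cur] = …' → pySetD (cur is always a
-- valid nonnegative index here, where Python's assignment succeeds)
def solution_alt (s : String) : List Int :=
  (PySem.List.sorted (PySem.Set.ofList s.toList) (fun c => c) false).foldl
    (fun answer c =>
      let idxs := ((PySem.List.enumerate s.toList 0).filter (fun p => p.2 == c)).map Prod.fst
      (idxs.zip idxs.tail).foldl
        (fun a pc => PySem.List.pySetD a pc.2 (pc.2 - pc.1)) answer)
    (List.replicate s.toList.length (-1))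

-- ===== PRECONDITION & SPEC =====
def Spec_solution (s : String) (out : List Int) : Prop := out = solution_alt s
instance (s : String) (out : List Int) : Decidable (Spec_solution s out) := by unfold Spec_solution; infer_instance

-- ===== CLAIM (what is proved, stated in full; the proofs are below) =====
def Claim_equal_solution : Prop := ∀ (s : String), Dom_solution s → Spec_solution s (solution s)

-- ===== LEMMAS AND PROOFS =====

-- the common specification value: distance to the previous occurrence, else -1
def fA (l : List Char) (i : Nat) : Int :=
  if l.getD i ' ' ∈ l.take i then (i : Int) - pyRfind (l.take i) (l.getD i ' ') else -1

-- occurrence list of a character (B's idxs)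
def occ (l : List Char) (c : Char) : List Int :=
  ((PySem.List.enumerate l 0).filter (fun p => p.2 == c)).map Prod.fst

-- consecutive-occurrence pairs of a character (B's zip)
def pairsOf (l : List Char) (c : Char) : List (Int × Int) :=
  (occ l c).zip (occ l c).tail

-- B's scatter loop, factored for the proofs
def scatter (ps : List (Int × Int)) (a : List Int) : List Int :=
  ps.foldl (fun a pc => PySem.List.pySetD a pc.2 (pc.2 - pc.1)) a

theorem pyRfind_append_singleton (pre : List Char) (a c : Char) :
    pyRfind (pre ++ [a]) c = if c = a then (pre.length : Int) else pyRfind pre c := by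
  unfold pyRfind
  rw [PySem.List.enumerate_append, List.foldl_append]
  simp [PySem.List.enumerate]
  by_cases h : a = c
  · simp [h]
  · simp only [if_neg h]
    rw [if_neg (fun h' => h h'.symm)]

-- ---------- A-side: solution = map of fA over range ----------

theorem solution_fold (rest : List Char) :
    ∀ (pre : List Char) (ans : List Int),
    ((List.range' pre.length rest.length).foldl (fun answer i =>
      if (pre ++ rest).getD i ' ' ∉ (pre ++ rest).take i then
        answer ++ [(-1 : Int)]
      else
        answer ++ [(i : Int) - pyRfind ((pre ++ rest).take i) ((pre ++ rest).getD i ' ')]) ans)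
    = ans ++ (List.range' pre.length rest.length).map (fun i => fA (pre ++ rest) i) := by
  induction rest with
  | nil => intro pre ans; simp
  | cons a rest ih =>
    intro pre ans
    rw [List.length_cons, List.range'_succ, List.foldl_cons, List.map_cons]
    have htake : (pre ++ a :: rest).take pre.length = pre := by simp
    have hget : (pre ++ a :: rest).getD pre.length ' ' = a := by simp [List.getD]
    have hfa : fA (pre ++ a :: rest) pre.length
        = if a ∈ pre then (pre.length : Int) - pyRfind pre a else -1 := by
      simp [fA, htake]
    have hassoc : pre ++ a :: rest = (pre ++ [a]) ++ rest := by simp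
    have hlen : pre.length + 1 = (pre ++ [a]).length := by simp
    rw [htake, hget, hfa, hassoc, hlen, ih (pre ++ [a])]
    by_cases hm : a ∈ pre
    · simp [hm]
    · simp [hm]

theorem solution_eq_map (s : String) :
    solution s = (List.range s.toList.length).map (fun i => fA s.toList i) := by
  unfold solution
  have h := solution_fold s.toList [] []
  simp only [List.length_nil, List.nil_append] at h
  rw [List.range_eq_range', h]

-- ---------- B-side: facts about occ / pairsOf ----------

theorem occ_append (l : List Char) (a c : Char) :
    occ (l ++ [a]) c = occ l c ++ (if a == c then [(l.length : Int)] else []) := by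
  unfold occ
  rw [PySem.List.enumerate_append, List.filter_append, List.map_append]
  by_cases h : a = c
  · simp [PySem.List.enumerate, h]
  · simp [PySem.List.enumerate, h]

theorem mem_occ {l : List Char} {c : Char} {q : Int} :
    q ∈ occ l c ↔ ∃ j : Nat, j < l.length ∧ q = (j : Int) ∧ l.getD j ' ' = c := by
  unfold occ
  simp only [List.mem_map, List.mem_filter, PySem.List.mem_enumerate_iff]
  constructor
  · rintro ⟨p, ⟨⟨k, hk, rfl⟩, hc⟩, rfl⟩
    refine ⟨k, hk, by simp, ?_⟩
    rw [List.getD_eq_getElem l ' ' hk]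
    simpa using hc
  · rintro ⟨j, hj, rfl, hc⟩
    refine ⟨((j : Int), l[j]), ⟨⟨j, hj, by simp⟩, ?_⟩, rfl⟩
    rw [List.getD_eq_getElem l ' ' hj] at hc
    simpa using hc

theorem occ_getLast? (l : List Char) (c : Char) :
    (occ l c).getLast? = if c ∈ l then some (pyRfind l c) else none := by
  induction l using List.reverseRecOn with
  | nil => simp [occ, PySem.List.enumerate]
  | append_singleton l a ih =>
    rw [occ_append, pyRfind_append_singleton]
    by_cases h : a = c
    · simp [h]
    · have h' : ¬ c = a := fun h' => h h'.symm
      simp [h, h', ih]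

theorem zip_tail_append (g : List Int) (x : Int) :
    (g ++ [x]).zip (g ++ [x]).tail
      = g.zip g.tail ++ (match g.getLast? with | some p => [(p, x)] | none => []) := by
  induction g with
  | nil => simp
  | cons h t ih =>
    cases t with
    | nil => simp
    | cons b t' =>
      simp only [List.cons_append, List.tail_cons, List.zip_cons_cons,
        List.getLast?_cons_cons]
      simp only [List.cons_append, List.tail_cons] at ih
      rw [ih]

theorem pairs_nonneg {l : List Char} {c : Char} {pc : Int × Int}
    (h : pc ∈ pairsOf l c) : 0 ≤ pc.2 := by
  obtain ⟨p, q⟩ := pc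
  obtain ⟨-, hq⟩ := List.of_mem_zip h
  have : q ∈ occ l c := List.mem_of_mem_tail hq
  obtain ⟨j, -, rfl, -⟩ := mem_occ.mp this
  positivity

theorem pairsOf_snd (l : List Char) (c : Char) {p q : Int}
    (h : (p, q) ∈ pairsOf l c) :
    ∃ j : Nat, q = (j : Int) ∧ j < l.length ∧ l.getD j ' ' = c ∧
      c ∈ l.take j ∧ p = pyRfind (l.take j) c := by
  induction l using List.reverseRecOn with
  | nil => simp [pairsOf, occ, PySem.List.enumerate] at h
  | append_singleton l a ih =>
    rw [pairsOf, occ_append] at h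
    by_cases ha : a = c
    · rw [if_pos (by simp [ha]), zip_tail_append, occ_getLast?] at h
      rcases List.mem_append.mp h with hold | hnew
      · obtain ⟨j, rfl, hj, hgd, hmem, hp⟩ := ih hold
        exact ⟨j, rfl, by simpa using Nat.lt_succ_of_lt hj,
          by rw [List.getD_append _ _ _ _ hj]; exact hgd,
          by rwa [List.take_append_of_le_length (Nat.le_of_lt hj)],
          by rwa [List.take_append_of_le_length (Nat.le_of_lt hj)]⟩
      · by_cases hc : c ∈ l
        · rw [if_pos hc] at hnew
          simp only [List.mem_singleton, Prod.mk.injEq] at hnew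
          obtain ⟨rfl, rfl⟩ := hnew
          refine ⟨l.length, rfl, by simp, ?_, ?_, ?_⟩
          · simp [List.getD, ha]
          · simpa [List.take_left] using hc
          · simp
        · simp [hc] at hnew
    · rw [if_neg (by simp [ha]), List.append_nil] at h
      obtain ⟨j, rfl, hj, hgd, hmem, hp⟩ := ih h
      exact ⟨j, rfl, by simpa using Nat.lt_succ_of_lt hj,
        by rw [List.getD_append _ _ _ _ hj]; exact hgd,
        by rwa [List.take_append_of_le_length (Nat.le_of_lt hj)],
        by rwa [List.take_append_of_le_length (Nat.le_of_lt hj)]⟩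

theorem pairsOf_exists (l : List Char) (c : Char) {j : Nat}
    (hj : j < l.length) (hc : l.getD j ' ' = c) (hm : c ∈ l.take j) :
    (pyRfind (l.take j) c, (j : Int)) ∈ pairsOf l c := by
  induction l using List.reverseRecOn with
  | nil => simp at hj
  | append_singleton l a ih =>
    rw [pairsOf, occ_append]
    rcases Nat.lt_succ_iff_lt_or_eq.mp (by simpa using hj) with hlt | rfl
    · have hgd : l.getD j ' ' = c := by
        rw [List.getD_append _ _ _ _ hlt] at hc; exact hc
      have hmem : c ∈ l.take j := by
        rwa [List.take_append_of_le_length (Nat.le_of_lt hlt)] at hm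
      have hold := ih hlt hgd hmem
      rw [List.take_append_of_le_length (Nat.le_of_lt hlt)]
      by_cases ha : a = c
      · rw [if_pos (by simp [ha]), zip_tail_append]
        exact List.mem_append_left _ hold
      · rw [if_neg (by simp [ha]), List.append_nil]
        exact hold
    · have hac : a = c := by simpa [List.getD] using hc
      have hcl : c ∈ l := by simpa [List.take_left] using hm
      rw [List.take_left]
      rw [if_pos (by simp [hac]), zip_tail_append, occ_getLast?, if_pos hcl]
      exact List.mem_append_right _ (by simp)

-- ---------- scatter lemmas ----------

theorem length_scatter (ps : List (Int × Int)) (a : List Int)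
    (hnn : ∀ pc ∈ ps, 0 ≤ pc.2) : (scatter ps a).length = a.length := by
  induction ps generalizing a with
  | nil => rfl
  | cons pc ps ih =>
    rw [scatter, List.foldl_cons,
      PySem.List.pySetD_of_nonneg _ _ (hnn pc (List.mem_cons_self ..))]
    rw [show (List.foldl (fun a pc => PySem.List.pySetD a pc.2 (pc.2 - pc.1)) (a.set pc.2.toNat (pc.2 - pc.1)) ps) = scatter ps (a.set pc.2.toNat (pc.2 - pc.1)) from rfl]
    rw [ih _ (fun q hq => hnn q (List.mem_cons_of_mem _ hq)), List.length_set]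

theorem scatter_skip (i : Nat) (ps : List (Int × Int)) (a : List Int)
    (hnn : ∀ pc ∈ ps, 0 ≤ pc.2) (h : ∀ pc ∈ ps, pc.2 ≠ (i : Int)) :
    (scatter ps a)[i]? = a[i]? := by
  induction ps generalizing a with
  | nil => rfl
  | cons pc ps ih =>
    have h0 : (0:Int) ≤ pc.2 := hnn pc (List.mem_cons_self ..)
    rw [scatter, List.foldl_cons, PySem.List.pySetD_of_nonneg _ _ h0]
    rw [show (List.foldl (fun a pc => PySem.List.pySetD a pc.2 (pc.2 - pc.1)) (a.set pc.2.toNat (pc.2 - pc.1)) ps) = scatter ps (a.set pc.2.toNat (pc.2 - pc.1)) from rfl]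
    rw [ih _ (fun q hq => hnn q (List.mem_cons_of_mem _ hq))
          (fun q hq => h q (List.mem_cons_of_mem _ hq))]
    exact List.getElem?_set_ne
      (fun hEq => h pc (List.mem_cons_self ..) (by rw [← hEq, Int.toNat_of_nonneg h0]))

theorem scatter_write (i : Nat) (v : Int) (ps : List (Int × Int)) (a : List Int)
    (hnn : ∀ pc ∈ ps, 0 ≤ pc.2) (hlen : i < a.length)
    (hv : ∀ pc ∈ ps, pc.2 = (i : Int) → pc.2 - pc.1 = v)
    (hst : a[i]? = some v ∨ ∃ pc ∈ ps, pc.2 = (i : Int)) :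
    (scatter ps a)[i]? = some v := by
  induction ps generalizing a with
  | nil =>
    rcases hst with h | ⟨pc, hpc, -⟩
    · exact h
    · simp at hpc
  | cons pc ps ih =>
    have h0 : (0:Int) ≤ pc.2 := hnn pc (List.mem_cons_self ..)
    rw [scatter, List.foldl_cons, PySem.List.pySetD_of_nonneg _ _ h0]
    rw [show (List.foldl (fun a pc => PySem.List.pySetD a pc.2 (pc.2 - pc.1)) (a.set pc.2.toNat (pc.2 - pc.1)) ps) = scatter ps (a.set pc.2.toNat (pc.2 - pc.1)) from rfl]
    have hnn' := fun q hq => hnn q (List.mem_cons_of_mem _ hq)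
    have hv' := fun q hq => hv q (List.mem_cons_of_mem _ hq)
    have hlen' : i < (a.set pc.2.toNat (pc.2 - pc.1)).length := by
      rwa [List.length_set]
    by_cases hq : pc.2 = (i : Int)
    · have ht : pc.2.toNat = i := by rw [hq]; simp
      refine ih _ hnn' hlen' hv' (Or.inl ?_)
      rw [ht, List.getElem?_set_self', List.getElem?_eq_getElem hlen]
      simp [hv pc (List.mem_cons_self ..) hq]
    · refine ih _ hnn' hlen' hv' ?_
      rcases hst with h | ⟨q, hqmem, hqi⟩
      · refine Or.inl ?_
        rw [List.getElem?_set_ne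
          (fun hEq => hq (by rw [← hEq, Int.toNat_of_nonneg h0])), h]
      · rcases List.mem_cons.mp hqmem with rfl | hmem
        · exact absurd hqi hq
        · exact Or.inr ⟨q, hmem, hqi⟩

-- ---------- outer fold over the character list ----------

theorem outer_len (l : List Char) (cs : List Char) (a : List Int) :
    (cs.foldl (fun answer c => scatter (pairsOf l c) answer) a).length = a.length := by
  induction cs generalizing a with
  | nil => rfl
  | cons c cs ih =>
    rw [List.foldl_cons, ih, length_scatter _ _ (fun pc hpc => pairs_nonneg hpc)]

theorem outer_skip (l : List Char) (i : Nat) (cs : List Char) (a : List Int)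
    (h : ∀ c ∈ cs, ∀ pc ∈ pairsOf l c, pc.2 ≠ (i : Int)) :
    (cs.foldl (fun answer c => scatter (pairsOf l c) answer) a)[i]? = a[i]? := by
  induction cs generalizing a with
  | nil => rfl
  | cons c cs ih =>
    rw [List.foldl_cons, ih _ (fun c' hc' => h c' (List.mem_cons_of_mem _ hc')),
      scatter_skip _ _ _ (fun pc hpc => pairs_nonneg hpc)
        (h c (List.mem_cons_self ..))]

theorem outer_write (l : List Char) (i : Nat) (v : Int) (cs : List Char) (a : List Int)
    (hlen : i < a.length)
    (hv : ∀ c ∈ cs, ∀ pc ∈ pairsOf l c, pc.2 = (i : Int) → pc.2 - pc.1 = v)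
    (hst : a[i]? = some v ∨ ∃ c ∈ cs, ∃ pc ∈ pairsOf l c, pc.2 = (i : Int)) :
    (cs.foldl (fun answer c => scatter (pairsOf l c) answer) a)[i]? = some v := by
  induction cs generalizing a with
  | nil =>
    rcases hst with h | ⟨c, hc, -⟩
    · exact h
    · simp at hc
  | cons c cs ih =>
    rw [List.foldl_cons]
    have hnnp : ∀ pc ∈ pairsOf l c, (0:Int) ≤ pc.2 := fun pc hpc => pairs_nonneg hpc
    have hlen' : i < (scatter (pairsOf l c) a).length := by
      rwa [length_scatter _ _ hnnp]
    have hv' := fun c' hc' => hv c' (List.mem_cons_of_mem _ hc')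
    by_cases hex : ∃ pc ∈ pairsOf l c, pc.2 = (i : Int)
    · refine ih _ hlen' hv' (Or.inl ?_)
      exact scatter_write i v _ a hnnp hlen (hv c (List.mem_cons_self ..)) (Or.inr hex)
    · rcases hst with h | ⟨c', hc', pc, hpc, hqi⟩
      · refine ih _ hlen' hv' (Or.inl ?_)
        rw [scatter_skip i _ a hnnp (fun pc hpc hq => hex ⟨pc, hpc, hq⟩)]
        exact h
      · rcases List.mem_cons.mp hc' with rfl | hmem
        · exact absurd ⟨pc, hpc, hqi⟩ hex
        · exact ih _ hlen' hv' (Or.inr ⟨c', hmem, pc, hpc, hqi⟩)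

-- ---------- assembling B ----------

theorem solution_alt_as_fold (s : String) :
    solution_alt s
      = (PySem.List.sorted (PySem.Set.ofList s.toList) (fun c => c) false).foldl
          (fun answer c => scatter (pairsOf s.toList c) answer)
          (List.replicate s.toList.length (-1)) := rfl

theorem solution_alt_eq_map (s : String) :
    solution_alt s = (List.range s.toList.length).map (fun i => fA s.toList i) := by
  rw [solution_alt_as_fold]
  set l := s.toList with hl
  set cs := PySem.List.sorted (PySem.Set.ofList l) (fun c => c) false with hcs
  apply List.ext_getElem?
  intro i
  by_cases hi : i < l.length
  · have hrhs : ((List.range l.length).map (fun i => fA l i))[i]? = some (fA l i) := by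
      simp [hi]
    rw [hrhs]
    by_cases hc : l.getD i ' ' ∈ l.take i
    · apply outer_write l i (fA l i) cs _ (by simpa using hi)
      · intro c' hc' pc hpc hq
        obtain ⟨j, hqj, hjlen, hgd, hmem, hp⟩ := pairsOf_snd l c' (p := pc.1) (q := pc.2) (by simpa using hpc)
        have hji : j = i := by
          have : ((j : Int)) = (i : Int) := by rw [← hqj, hq]
          exact_mod_cast this
        subst hji
        rw [hq, hp, ← hgd, fA, if_pos (hgd ▸ hc)]
      · refine Or.inr ⟨l.getD i ' ', ?_, ?_⟩
        · rw [hcs, PySem.List.mem_sorted, PySem.Set.mem_ofList]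
          rw [List.getD_eq_getElem l ' ' hi]
          exact List.getElem_mem hi
        · refine ⟨(pyRfind (l.take i) (l.getD i ' '), (i : Int)), ?_, rfl⟩
          exact pairsOf_exists l _ hi rfl hc
    · rw [outer_skip]
      · have hc' : l[i] ∉ List.take i l := by
          rw [← List.getD_eq_getElem l ' ' hi]; exact hc
        simp [hi, fA, hc']
      · intro c' hc' pc hpc hq
        obtain ⟨j, hqj, hjlen, hgd, hmem, hp⟩ := pairsOf_snd l c' (p := pc.1) (q := pc.2) (by simpa using hpc)
        have hji : j = i := by
          have : ((j : Int)) = (i : Int) := by rw [← hqj, hq]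
          exact_mod_cast this
        subst hji
        exact hc (hgd ▸ hmem)
  · have h1 : (cs.foldl (fun answer c => scatter (pairsOf l c) answer)
        (List.replicate l.length (-1)))[i]? = none := by
      apply List.getElem?_eq_none
      rw [outer_len]
      simpa using Nat.le_of_not_lt hi
    have h2 : ((List.range l.length).map (fun i => fA l i))[i]? = none := by
      apply List.getElem?_eq_none
      simpa using Nat.le_of_not_lt hi
    rw [h1, h2]

-- ===== VERDICT (by name: the statement is the Claim_ definition above) =====
theorem solution_spec : Claim_equal_solution := by
  intro s _
  unfold Spec_solution
  rw [solution_eq_map, solution_alt_eq_map]
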